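-- pv_equiv track=rewrite | github.com/kaedonj16/fantasy-dashboard | dashboard_services/service.py | _current_streak
-- ===== SOURCE A (Python) =====
-- def _current_streak(series_results: list[str]) -> tuple[str, int]:
--     """
--     Input is a list like ['W','L','W','W'] in chronological order.
--     Returns (type, length) e.g. ('W', 2). If empty, ('', 0).
--     """
--     if not series_results:
--         return ("", 0)
--     last = series_results[-1]
--     n = 1
--     for r in reversed(series_results[:-1]):
--         if r == last:
--             n += 1
--         else:
--             break
--     return (last, n)
-- ===== SOURCE B (Python) =====
-- def _current_streak(series_results: list[str]) -> tuple[str, int]: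
--     # Single forward pass: track the key and length of the run in progress;
--     # the state left at the end describes the trailing run. Empty -> ("", 0).
--     key, n = "", 0
--     for r in series_results:
--         if r == key:
--             n += 1
--         else:
--             key, n = r, 1
--     return (key, n)
-- ===== Notes on version B (the rewrite author's own statement) =====
-- stated objective: simpler
-- what changed: B replaces A's slice/reverse backward scan with break by a single forward pass that tracks the current run's key and length; the state at the end is the trailing streak.
import Mathlib
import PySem

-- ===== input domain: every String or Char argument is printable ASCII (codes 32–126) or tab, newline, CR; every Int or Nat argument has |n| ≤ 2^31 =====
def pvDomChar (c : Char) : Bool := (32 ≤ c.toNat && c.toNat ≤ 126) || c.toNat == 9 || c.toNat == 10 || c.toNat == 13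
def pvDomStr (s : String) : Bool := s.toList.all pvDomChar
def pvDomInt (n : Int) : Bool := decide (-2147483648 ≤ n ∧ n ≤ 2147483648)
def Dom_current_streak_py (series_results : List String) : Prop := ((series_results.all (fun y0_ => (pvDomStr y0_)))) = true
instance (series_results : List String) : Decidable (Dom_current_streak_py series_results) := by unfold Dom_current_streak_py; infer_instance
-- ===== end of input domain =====

-- B replaces A's backward scan (slice/reverse with break) by a single forward pass tracking the current run; simpler decomposition, same O(n).


-- ===== PORT A =====
-- A's loop `for r in reversed(series_results[:-1]): if r == last: n += 1 else: break`
def pvALoop (l : List String) (last : String) (n : Int) : Int :=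
  match l with
  | [] => n
  | r :: rs => if r = last then pvALoop rs last (n + 1) else n

def current_streak_py (series_results : List String) : String × Int :=
  if h : series_results = [] then ("", 0)          -- if not series_results: return ("", 0)
  else
    let last := series_results.getLast h           -- last = series_results[-1]
    -- reversed(series_results[:-1]) = series_results.dropLast.reverse
    (last, pvALoop (series_results.dropLast.reverse) last 1)

-- ===== PORT B =====
-- one forward fold: state = (key, length) of the run in progress
def current_streak_py_alt (series_results : List String) : String × Int :=
  series_results.foldl
    (fun st r => if r = st.1 then (st.1, st.2 + 1) else (r, 1)) ("", 0)

-- ===== PRECONDITION & SPEC =====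
def Spec_current_streak_py (series_results : List String) (out : String × Int) : Prop := out = current_streak_py_alt series_results
instance (series_results : List String) (out : String × Int) : Decidable (Spec_current_streak_py series_results out) := by unfold Spec_current_streak_py; infer_instance

-- ===== CLAIM (what is proved, stated in full; the proofs are below) =====
def Claim_equal_current_streak_py : Prop := ∀ (series_results : List String), Dom_current_streak_py series_results → Spec_current_streak_py series_results (current_streak_py series_results)

-- ===== LEMMAS AND PROOFS =====

theorem pvALoop_succ (l : List String) (last : String) (n : Int) :
    pvALoop l last (n + 1) = pvALoop l last n + 1 := by
  induction l generalizing n with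
  | nil => rfl
  | cons r rs ih =>
      simp only [pvALoop]
      split_ifs with h
      · exact ih (n + 1)
      · rfl

theorem foldl_concat_eq (ys : List String) :
    ∀ r : String,
      List.foldl (fun st x => if x = st.1 then (st.1, st.2 + 1) else (x, 1))
        (("" : String), (0 : Int)) (ys ++ [r])
        = (r, pvALoop ys.reverse r 1) := by
  induction ys using List.reverseRecOn with
  | nil =>
      intro r
      simp only [List.nil_append, List.foldl_cons, List.foldl_nil, List.reverse_nil, pvALoop]
      split_ifs with h
      · simp [← h]
      · rfl
  | append_singleton zs q ih =>
      intro r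
      rw [List.append_assoc]
      rw [List.foldl_append]
      have ihq := ih q
      rw [List.foldl_append] at ihq
      simp only [List.singleton_append, List.foldl_cons, List.foldl_nil] at ihq ⊢
      rw [ihq]
      simp only [List.reverse_append, List.reverse_cons, List.reverse_nil, List.nil_append,
        List.singleton_append, pvALoop]
      by_cases h : r = q
      · subst h
        rw [if_pos rfl, if_pos rfl, pvALoop_succ]
      · rw [if_neg h, if_neg (fun hq => h hq.symm)]

theorem current_streak_py_eq (xs : List String) :
    current_streak_py xs = current_streak_py_alt xs := by
  induction xs using List.reverseRecOn with
  | nil => rfl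
  | append_singleton ys r _ =>
      have hne : ys ++ [r] ≠ [] := by simp
      unfold current_streak_py current_streak_py_alt
      rw [dif_neg hne]
      simp only [List.getLast_append, List.dropLast_concat]
      exact (foldl_concat_eq ys r).symm

-- ===== VERDICT (by name: the statement is the Claim_ definition above) =====
theorem current_streak_py_spec : Claim_equal_current_streak_py := by
  intro xs _
  unfold Spec_current_streak_py
  exact current_streak_py_eq xs
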